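-- pv_equiv track=rewrite | github.com/null543/prak2 | t1.py | month_digit_sums
-- ===== SOURCE A (Python) =====
-- def digit_sum(n):
--     return sum(int(d) for d in str(n))
--
-- days_in_month = [31, 28, 31, 30, 31, 30, 31, 31, 30, 31, 30, 31]
--
-- def month_digit_sums(year):
--     # проверяем, является ли год високосным
--     is_leap_year = (year % 4 == 0 and year % 100 != 0) or year % 400 == 0
--
--     # если год високосный, то меняем количество дней в феврале
--     if is_leap_year:
--         days_in_month[1] = 29
--     else:
--         days_in_month[1] = 28
--
--     # создаем список с суммами цифр для каждого месяца
--     month_sums = [0] * 12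
--
--     # перебираем все дни в году и добавляем сумму цифр в соответствующий месяц
--     for month, days in enumerate(days_in_month):
--         for day in range(1, days + 1):
--             month_sums[month] += digit_sum(day)
--
--     return month_sums
-- ===== SOURCE B (Python) =====
-- def digit_sum(n):
--     return sum(int(d) for d in str(n))
--
-- days_in_month = [31, 28, 31, 30, 31, 30, 31, 31, 30, 31, 30, 31]
--
-- def month_digit_sums(year):
--     is_leap_year = (year % 4 == 0 and year % 100 != 0) or year % 400 == 0
--     days_in_month[1] = 29 if is_leap_year else 28
--
--     # closed form for sum_{d=1}^{n} digit_sum(d), valid for 0 <= n <= 99: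
--     # ones digits contribute 45 per full decade plus r*(r+1)/2 for the partial one,
--     # tens digits contribute 5*q*(q-1) for full decades plus (r+1)*q for the partial one.
--     def prefix(n):
--         q, r = divmod(n, 10)
--         return 45 * q + r * (r + 1) // 2 + 5 * q * (q - 1) + (r + 1) * q
--
--     return [prefix(days) for days in days_in_month]
-- ===== Notes on version B (the rewrite author's own statement) =====
-- stated objective: alternative
-- what changed: Replaces the nested month/day loops with string-based digit sums by a closed-form arithmetic formula (in q and r from divmod of the day count by ten) for the sum of digit sums of the first n integers, mapped once over the months; no per-day loop and no str conversion, the leap-year mutation of days_in_month's February entry is preserved.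
import Mathlib
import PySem

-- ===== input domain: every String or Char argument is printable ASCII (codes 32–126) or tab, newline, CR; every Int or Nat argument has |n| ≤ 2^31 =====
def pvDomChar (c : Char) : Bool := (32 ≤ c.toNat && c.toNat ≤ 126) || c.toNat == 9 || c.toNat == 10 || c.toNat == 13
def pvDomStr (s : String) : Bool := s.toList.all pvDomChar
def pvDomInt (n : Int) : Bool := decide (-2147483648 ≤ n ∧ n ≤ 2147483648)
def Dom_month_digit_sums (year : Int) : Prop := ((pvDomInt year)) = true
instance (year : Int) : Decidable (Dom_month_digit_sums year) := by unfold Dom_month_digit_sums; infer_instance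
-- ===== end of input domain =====

-- B replaces A's nested month/day loops with string digit sums by a closed-form arithmetic
-- formula for the sum of digit sums of 1..n, mapped once over the months (objective:
-- alternative; return value only — both Pythons also mutate the module-level
-- days_in_month[1] the same way).


-- ===== PORT A =====
-- digit_sum(n) = sum(int(d) for d in str(n)); the .getD 0 is unreachable in this program
-- (digit_sum is only applied to 1..31, whose str consists of digit chars, so int(d) succeeds).
def pvDigitSumA (n : Int) : Int :=
  ((PySem.Int.toChars n).map (fun d => (PySem.Int.ofChars? [d]).getD 0)).sum

def month_digit_sums (year : Int) : List Int :=
  let isLeap := (PySem.Int.mod year 4 == 0 && PySem.Int.mod year 100 != 0)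
                || PySem.Int.mod year 400 == 0
  -- days_in_month after the February assignment
  let dim : List Int := [31, if isLeap then 29 else 28, 31, 30, 31, 30, 31, 31, 30, 31, 30, 31]
  let init : List Int := List.replicate 12 0
  (PySem.List.enumerate dim).foldl
    (fun ms p =>
      (PySem.List.pyRange 1 (p.2 + 1) 1).foldl
        (fun ms day => PySem.List.pySetD ms p.1 (PySem.List.pyGetD ms p.1 0 + pvDigitSumA day))
        ms)
    init

-- ===== PORT B =====
-- prefix n = sum of digit sums of 1..n in closed form (valid for 0 ≤ n ≤ 99)
def pvPrefixB (n : Int) : Int :=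
  let q := PySem.Int.floordiv n 10
  let r := PySem.Int.mod n 10
  45 * q + PySem.Int.floordiv (r * (r + 1)) 2 + 5 * q * (q - 1) + (r + 1) * q

def month_digit_sums_alt (year : Int) : List Int :=
  let isLeap := (PySem.Int.mod year 4 == 0 && PySem.Int.mod year 100 != 0)
                || PySem.Int.mod year 400 == 0
  let dim : List Int := [31, if isLeap then 29 else 28, 31, 30, 31, 30, 31, 31, 30, 31, 30, 31]
  dim.map pvPrefixB

-- ===== PRECONDITION & SPEC =====
def Spec_month_digit_sums (year : Int) (out : List Int) : Prop := out = month_digit_sums_alt year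
instance (year : Int) (out : List Int) : Decidable (Spec_month_digit_sums year out) := by unfold Spec_month_digit_sums; infer_instance

-- ===== CLAIM (what is proved, stated in full; the proofs are below) =====
def Claim_equal_month_digit_sums : Prop := ∀ (year : Int), Dom_month_digit_sums year → Spec_month_digit_sums year (month_digit_sums year)

-- ===== LEMMAS AND PROOFS =====
-- Both results depend on year only through the leap-year Bool; case on it and evaluate.
set_option maxRecDepth 100000 in
theorem pv_eval (b : Bool) :
    (let dim : List Int := [31, if b then 29 else 28, 31, 30, 31, 30, 31, 31, 30, 31, 30, 31]
     let init : List Int := List.replicate 12 0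
     (PySem.List.enumerate dim).foldl
       (fun ms p =>
         (PySem.List.pyRange 1 (p.2 + 1) 1).foldl
           (fun ms day => PySem.List.pySetD ms p.1 (PySem.List.pyGetD ms p.1 0 + pvDigitSumA day))
           ms)
       init)
    =
    (let dim : List Int := [31, if b then 29 else 28, 31, 30, 31, 30, 31, 31, 30, 31, 30, 31]
     dim.map pvPrefixB) := by
  cases b <;> decide

-- ===== VERDICT (by name: the statement is the Claim_ definition above) =====
theorem month_digit_sums_spec : Claim_equal_month_digit_sums := by
  intro year _
  unfold Spec_month_digit_sums month_digit_sums month_digit_sums_alt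
  exact pv_eval _
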